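-- pv_equiv track=rewrite | github.com/Sartoss/projet-labyrinthe | maindroite.py | genere_matrice
-- ===== SOURCE A (Python) =====
-- def genere_matrice(h,l):
--     matrice=[[-1]*(2*l+1)]
--     for i in range(h):
--         liste=[-1]
--         for j in range(l):
--             liste.append(h*i+j)
--             liste.append(-1)
--         matrice.append(liste)
--         matrice.append([-1]*(2*l+1))
--     return matrice
-- ===== SOURCE B (Python) =====
-- def genere_matrice(h, l):
--     # Column-major construction: build the 2*l+1 columns of the grid (a wall
--     # column, then per maze column j a cell column interleaved with wall
--     # columns), and transpose with zip(*) to obtain the rows.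
--     wall_col = [-1] * (2 * h + 1)
--     cols = [wall_col]
--     for j in range(l):
--         col = [-1]
--         for i in range(h):
--             col.append(h * i + j)
--             col.append(-1)
--         cols.append(col)
--         cols.append(wall_col)
--     return [list(row) for row in zip(*cols)]
-- ===== Notes on version B (the rewrite author's own statement) =====
-- stated objective: alternative
-- what changed: Replaces A's row-major interleaved construction with a column-major one: B builds the 2*l+1 columns of the grid (wall columns interleaved with per-maze-column cell columns) and then transposes them with zip(*) to obtain the rows.
-- outside the precondition, e.g. on genere_matrice(-1, 2): A returns [[-1, -1, -1, -1, -1]], B returns []; on genere_matrice(1, -1): A returns [[], [-1], []], B returns [[-1], [-1], [-1]]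
import Mathlib
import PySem

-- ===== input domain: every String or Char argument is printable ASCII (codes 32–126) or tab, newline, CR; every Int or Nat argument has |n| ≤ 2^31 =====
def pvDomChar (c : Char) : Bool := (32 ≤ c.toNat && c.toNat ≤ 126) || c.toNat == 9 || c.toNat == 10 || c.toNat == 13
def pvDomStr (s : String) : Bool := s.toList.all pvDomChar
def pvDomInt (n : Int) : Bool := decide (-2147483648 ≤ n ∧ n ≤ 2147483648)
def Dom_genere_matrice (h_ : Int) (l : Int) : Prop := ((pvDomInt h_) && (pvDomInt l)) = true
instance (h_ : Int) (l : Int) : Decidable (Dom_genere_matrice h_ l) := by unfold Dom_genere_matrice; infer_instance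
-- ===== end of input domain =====

-- B builds the grid column-major (wall/cell columns interleaved) and transposes with
-- zip(*) instead of A's row-major interleaved construction (objective: alternative, same cost).


-- ===== PORT A =====
def genere_matrice (h_ : Int) (l : Int) : List (List Int) :=
  (PySem.List.pyRange 0 h_ 1).foldl
    (fun matrice i =>
      let liste := (PySem.List.pyRange 0 l 1).foldl
          (fun liste j => (liste ++ [h_ * i + j]) ++ [-1]) [-1]
      (matrice ++ [liste]) ++ [PySem.List.pyRepeat [-1] (2 * l + 1)])
    [PySem.List.pyRepeat [-1] (2 * l + 1)]

-- ===== PORT B =====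
-- hand port of Python's zip(*cols) on lists (exact: zip stops as soon as any column is exhausted)
def pyZipGo : List Int → List (List Int) → List (List Int)
  | [], _ => []
  | a :: t, rest =>
    if rest.all (fun c => !c.isEmpty) then
      (a :: rest.map (fun c => c.headD 0)) :: pyZipGo t (rest.map List.tail)
    else []

def pyZip : List (List Int) → List (List Int)
  | [] => []
  | c0 :: rest => pyZipGo c0 rest

def genere_matrice_alt (h_ : Int) (l : Int) : List (List Int) :=
  let wall_col := PySem.List.pyRepeat [-1] (2 * h_ + 1)
  let cols := (PySem.List.pyRange 0 l 1).foldl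
    (fun cols j =>
      let col := (PySem.List.pyRange 0 h_ 1).foldl
          (fun col i => (col ++ [h_ * i + j]) ++ [-1]) [-1]
      (cols ++ [col]) ++ [wall_col]) [wall_col]
  pyZip cols

-- ===== PRECONDITION & SPEC =====
-- Pre_ restricts to the natural maze domain: for a negative dimension (an input no maze
-- has) A's and B's degenerate scaffolding (one all-separator row vs. truncated columns)
-- are both implementation accidents, so those inputs are excluded.
def Pre_genere_matrice (h_ : Int) (l : Int) : Prop := 0 ≤ h_ ∧ 0 ≤ l
instance (h_ : Int) (l : Int) : Decidable (Pre_genere_matrice h_ l) := by unfold Pre_genere_matrice; infer_instance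
def pvWitness_genere_matrice : Int × Int := (2, 3)

def Spec_genere_matrice (h_ : Int) (l : Int) (out : List (List Int)) : Prop := out = genere_matrice_alt h_ l
instance (h_ : Int) (l : Int) (out : List (List Int)) : Decidable (Spec_genere_matrice h_ l out) := by unfold Spec_genere_matrice; infer_instance

-- ===== CLAIM (what is proved, stated in full; the proofs are below) =====
def Claim_equal_genere_matrice : Prop := ∀ (h_ : Int) (l : Int), Dom_genere_matrice h_ l → Pre_genere_matrice h_ l → Spec_genere_matrice h_ l (genere_matrice h_ l)

-- ===== LEMMAS AND PROOFS =====

-- A's (and B's column-building) loop shape: append f i then a fixed element, as a flatMap.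
theorem foldl_append_pair {α β : Type} (L : List α) (f : α → β) (s : β) (acc : List β) :
    L.foldl (fun m i => (m ++ [f i]) ++ [s]) acc = acc ++ L.flatMap (fun i => [f i, s]) := by
  induction L generalizing acc with
  | nil => simp
  | cons x t ih => simp [List.flatMap]

-- a map over range (2n+1) splits into f 0 followed by odd/even pairs
theorem range_odd_even {β : Type} (f : Nat → β) (n : Nat) :
    (List.range (2 * n + 1)).map f
      = f 0 :: (List.range n).flatMap (fun i => [f (2 * i + 1), f (2 * i + 2)]) := by
  induction n with
  | zero => simp
  | succ k ih =>
    have h1 : 2 * (k + 1) + 1 = (2 * k + 1) + 1 + 1 := by ring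
    rw [h1, List.range_succ, List.range_succ, List.map_append, List.map_append, ih,
        List.range_succ]
    simp

theorem map_range_const (n : Nat) (b : Int) :
    (List.range n).map (fun _ => b) = List.replicate n b := by
  induction n with
  | zero => simp
  | succ k ih => rw [List.range_succ]; simp [ih, List.replicate_succ']

-- the transpose: pyZipGo of a column-major rectangle is the row-major rectangle
theorem pyZipGo_mat (W : Nat) : ∀ (Ht : Nat) (g : Nat → Nat → Int),
    pyZipGo ((List.range Ht).map (fun r => g r 0))
            ((List.range W).map (fun c => (List.range Ht).map (fun r => g r (c + 1))))
      = (List.range Ht).map (fun r => (List.range (W + 1)).map (fun c => g r c)) := by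
  intro Ht
  induction Ht with
  | zero => intro g; simp [pyZipGo]
  | succ k ih =>
    intro g
    rw [List.range_succ_eq_map]
    simp only [List.map_cons, List.map_map, Function.comp_def, Nat.succ_eq_add_one]
    rw [pyZipGo, if_pos (by simp)]
    have htail : (((List.range W).map fun c => g 0 (c + 1) :: (List.range k).map fun r => g (r + 1) (c + 1)).map List.tail)
        = (List.range W).map (fun c => (List.range k).map fun r => g (r + 1) (c + 1)) := by
      simp
    have hhead : (((List.range W).map fun c => g 0 (c + 1) :: (List.range k).map fun r => g (r + 1) (c + 1)).map (fun c => c.headD 0))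
        = (List.range W).map (fun c => g 0 (c + 1)) := by
      simp
    rw [htail, hhead]
    have ih' := ih (fun r c => g (r + 1) c)
    simp only at ih'
    rw [ih']
    congr 1
    rw [List.range_succ_eq_map]
    simp

theorem pyZip_mat (W Ht : Nat) (g : Nat → Nat → Int) :
    pyZip ((List.range (W + 1)).map (fun c => (List.range Ht).map (fun r => g r c)))
      = (List.range Ht).map (fun r => (List.range (W + 1)).map (fun c => g r c)) := by
  conv_lhs => rw [List.range_succ_eq_map]
  simp only [List.map_cons, List.map_map, Function.comp_def, Nat.succ_eq_add_one]
  rw [pyZip]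
  exact pyZipGo_mat W Ht g

-- coordinate value of the grid: -1 everywhere except odd/odd positions
def gFn (hn r c : Nat) : Int :=
  if r % 2 = 1 ∧ c % 2 = 1 then (hn : Int) * (((r - 1) / 2 : Nat) : Int) + (((c - 1) / 2 : Nat) : Int)
  else -1

def mazeWall (ln : Nat) : List Int := List.replicate (2 * ln + 1) (-1)

def mazeCell (hn ln k : Nat) : List Int :=
  -1 :: (List.range ln).flatMap (fun j : Nat => [(hn : Int) * (k : Int) + (j : Int), -1])

theorem gFn_even_r (hn r c : Nat) (hr : r % 2 = 0) : gFn hn r c = -1 := by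
  simp [gFn, hr]

theorem gFn_even_c (hn r c : Nat) (hc : c % 2 = 0) : gFn hn r c = -1 := by
  unfold gFn
  rw [if_neg (by omega)]

theorem gFn_odd_odd (hn k j : Nat) :
    gFn hn (2 * k + 1) (2 * j + 1) = (hn : Int) * (k : Int) + (j : Int) := by
  unfold gFn
  rw [if_pos ⟨by omega, by omega⟩]
  simp only [show (2 * k + 1 - 1) / 2 = k from by omega,
             show (2 * j + 1 - 1) / 2 = j from by omega]

theorem row_even (hn ln r : Nat) (hr : r % 2 = 0) :
    (List.range (2 * ln + 1)).map (fun c => gFn hn r c) = mazeWall ln := by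
  have hfn : (fun c => gFn hn r c) = fun _ : Nat => (-1 : Int) := by
    funext c; exact gFn_even_r hn r c hr
  rw [hfn, map_range_const, mazeWall]

theorem col_even (hn _ln c : Nat) (hc : c % 2 = 0) :
    (List.range (2 * hn + 1)).map (fun r => gFn hn r c) = mazeWall hn := by
  have hfn : (fun r => gFn hn r c) = fun _ : Nat => (-1 : Int) := by
    funext r; exact gFn_even_c hn r c hc
  rw [hfn, map_range_const, mazeWall]

theorem flatMap_ext {α β : Type} (l : List α) (f g : α → List β) (h : ∀ x, f x = g x) :
    l.flatMap f = l.flatMap g := by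
  rw [funext h]

theorem row_odd (hn ln k : Nat) :
    (List.range (2 * ln + 1)).map (fun c => gFn hn (2 * k + 1) c) = mazeCell hn ln k := by
  rw [range_odd_even (fun c => gFn hn (2 * k + 1) c) ln, mazeCell,
      gFn_even_c hn (2 * k + 1) 0 rfl]
  congr 1
  exact flatMap_ext _ _ _ (fun j => by
    rw [gFn_odd_odd hn k j, gFn_even_c hn (2 * k + 1) (2 * j + 2) (by omega)])

theorem col_odd (hn _ln j : Nat) :
    (List.range (2 * hn + 1)).map (fun r => gFn hn r (2 * j + 1))
      = -1 :: (List.range hn).flatMap (fun k : Nat => [(hn : Int) * (k : Int) + (j : Int), -1]) := by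
  rw [range_odd_even (fun r => gFn hn r (2 * j + 1)) hn,
      gFn_even_r hn 0 (2 * j + 1) rfl]
  congr 1
  exact flatMap_ext _ _ _ (fun k => by
    rw [gFn_odd_odd hn k j, gFn_even_r hn (2 * k + 2) (2 * j + 1) (by omega)])

-- A in closed form
theorem A_closed (hn ln : Nat) :
    genere_matrice (hn : Int) (ln : Int)
      = mazeWall ln :: (List.range hn).flatMap (fun k => [mazeCell hn ln k, mazeWall ln]) := by
  unfold genere_matrice
  dsimp only
  rw [foldl_append_pair, PySem.List.pyRange_one 0 (hn : Int), List.flatMap_map]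
  have hrep : PySem.List.pyRepeat [(-1 : Int)] (2 * (ln : Int) + 1) = mazeWall ln := by
    rw [PySem.List.pyRepeat_singleton, mazeWall]
    congr 1
  simp only [sub_zero, Int.toNat_natCast, zero_add, hrep, List.singleton_append]
  have hc : ∀ k : Nat,
      (PySem.List.pyRange 0 (ln : Int) 1).foldl
        (fun liste j => (liste ++ [(hn : Int) * (k : Int) + j]) ++ [-1]) [-1]
      = mazeCell hn ln k := by
    intro k
    rw [foldl_append_pair, PySem.List.pyRange_one 0 (ln : Int), List.flatMap_map, mazeCell]
    simp only [sub_zero, Int.toNat_natCast, List.singleton_append]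
    congr 1
    exact flatMap_ext _ _ _ (fun a => by simp)
  simp only [hc]

-- the closed form is the coordinate rectangle, row-major
theorem closed_coord (hn ln : Nat) :
    mazeWall ln :: (List.range hn).flatMap (fun k => [mazeCell hn ln k, mazeWall ln])
      = (List.range (2 * hn + 1)).map (fun r => (List.range (2 * ln + 1)).map (fun c => gFn hn r c)) := by
  rw [range_odd_even (fun r => (List.range (2 * ln + 1)).map (fun c => gFn hn r c)) hn,
      row_even hn ln 0 rfl]
  have h1 : ∀ k : Nat,
      (List.range (2 * ln + 1)).map (fun c => gFn hn (2 * k + 1) c) = mazeCell hn ln k :=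
    fun k => row_odd hn ln k
  have h2 : ∀ k : Nat,
      (List.range (2 * ln + 1)).map (fun c => gFn hn (2 * k + 2) c) = mazeWall ln :=
    fun k => row_even hn ln (2 * k + 2) (by omega)
  simp only [h1, h2]

-- B's column list is the coordinate rectangle, column-major
theorem B_cols (hn ln : Nat) :
    (PySem.List.pyRange 0 (ln : Int) 1).foldl
      (fun cols j =>
        (cols ++ [(PySem.List.pyRange 0 (hn : Int) 1).foldl
            (fun col i => (col ++ [(hn : Int) * i + j]) ++ [-1]) [-1]])
          ++ [PySem.List.pyRepeat [-1] (2 * (hn : Int) + 1)])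
      [PySem.List.pyRepeat [-1] (2 * (hn : Int) + 1)]
      = (List.range (2 * ln + 1)).map (fun c => (List.range (2 * hn + 1)).map (fun r => gFn hn r c)) := by
  have hrep : PySem.List.pyRepeat [(-1 : Int)] (2 * (hn : Int) + 1) = mazeWall hn := by
    rw [PySem.List.pyRepeat_singleton, mazeWall]
    congr 1
  rw [foldl_append_pair, PySem.List.pyRange_one 0 (ln : Int), List.flatMap_map,
      range_odd_even (fun c => (List.range (2 * hn + 1)).map (fun r => gFn hn r c)) ln,
      col_even hn ln 0 rfl]
  simp only [sub_zero, Int.toNat_natCast, zero_add, hrep, List.singleton_append]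
  have h1 : ∀ j : Nat,
      (PySem.List.pyRange 0 (hn : Int) 1).foldl
        (fun col i => (col ++ [(hn : Int) * i + (j : Int)]) ++ [-1]) [-1]
      = (List.range (2 * hn + 1)).map (fun r => gFn hn r (2 * j + 1)) := by
    intro j
    rw [foldl_append_pair, PySem.List.pyRange_one 0 (hn : Int), List.flatMap_map,
        col_odd hn ln j]
    simp only [sub_zero, Int.toNat_natCast, List.singleton_append]
    congr 1
    exact flatMap_ext _ _ _ (fun a => by simp)
  have h2 : ∀ j : Nat,
      (List.range (2 * hn + 1)).map (fun r => gFn hn r (2 * j + 2)) = mazeWall hn :=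
    fun j => col_even hn ln (2 * j + 2) (by omega)
  simp only [h1, h2]

-- ===== VERDICT (by name: the statement is the Claim_ definition above) =====
theorem genere_matrice_spec : Claim_equal_genere_matrice := by
  intro h_ l _ hpre
  obtain ⟨hh, hl⟩ := hpre
  obtain ⟨hn, rfl⟩ := Int.eq_ofNat_of_zero_le hh
  obtain ⟨ln, rfl⟩ := Int.eq_ofNat_of_zero_le hl
  unfold Spec_genere_matrice genere_matrice_alt
  dsimp only
  rw [B_cols hn ln, pyZip_mat (2 * ln) (2 * hn + 1) (gFn hn), A_closed hn ln,
      closed_coord hn ln]
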